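-- pv_equiv track=rewrite | github.com/vmc13/computacao-ifpi-catzs-2024 | algoritmos/05 - Listas/New folder/Questões/questao04.py | analisar_idades
-- ===== SOURCE A (Python) =====
-- def analisar_idades(idades):
--     maiores_idade = 0
--     menores_idade = 0
--     existe_quinze = False
--
--     for idade in idades:
--         if idade >= 18:
--             maiores_idade += 1
--         else:
--             menores_idade += 1
--
--         if idade == 15:
--             existe_quinze = True
--
--     return maiores_idade, menores_idade, existe_quinze
-- ===== SOURCE B (Python) =====
-- def analisar_idades(idades):
--     # Divide-and-conquer: split the list in half, solve each half recursively,
--     # and combine (adults1+adults2, minors1+minors2, has15_1 or has15_2).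
--     def go(lo, hi):
--         n = hi - lo
--         if n == 0:
--             return (0, 0, False)
--         if n == 1:
--             i = idades[lo]
--             return ((1, 0) if i >= 18 else (0, 1)) + (i == 15,)
--         mid = lo + n // 2
--         a1, m1, q1 = go(lo, mid)
--         a2, m2, q2 = go(mid, hi)
--         return (a1 + a2, m1 + m2, q1 or q2)
--     return go(0, len(idades))
-- ===== Notes on version B (the rewrite author's own statement) =====
-- stated objective: alternative
-- what changed: Replaces the single left-to-right accumulating loop with a divide-and-conquer recursion that splits the list in half and combines the two halves' (adults, minors, has-fifteen) triples monoidally.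
import Mathlib
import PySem

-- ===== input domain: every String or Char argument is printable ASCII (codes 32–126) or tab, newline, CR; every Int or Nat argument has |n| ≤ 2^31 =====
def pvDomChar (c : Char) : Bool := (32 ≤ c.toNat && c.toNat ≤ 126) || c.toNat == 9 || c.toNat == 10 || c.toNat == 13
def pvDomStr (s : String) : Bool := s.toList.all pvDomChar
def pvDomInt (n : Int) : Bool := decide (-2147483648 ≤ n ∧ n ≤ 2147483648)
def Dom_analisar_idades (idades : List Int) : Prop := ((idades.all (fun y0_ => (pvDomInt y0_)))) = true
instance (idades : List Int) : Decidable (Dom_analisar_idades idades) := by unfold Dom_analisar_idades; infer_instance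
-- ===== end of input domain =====

-- B replaces A's single accumulating pass with a divide-and-conquer recursion
-- that splits the list in half and combines the halves' triples (alternative decomposition).

-- ===== PORT A =====
def analisar_idades (idades : List Int) : Int × Int × Bool :=
  idades.foldl
    (fun st idade =>
      let st1 : Int × Int × Bool :=
        if idade ≥ 18 then (st.1 + 1, st.2.1, st.2.2) else (st.1, st.2.1 + 1, st.2.2)
      if idade = 15 then (st1.1, st1.2.1, true) else st1)
    (0, 0, false)

-- ===== PORT B =====
-- go(lo, hi) over idades[lo:hi] is ported as recursion over the sublist itself:
-- the base cases match n == 0 and n == 1, and the split at mid = lo + n // 2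
-- becomes take/drop at length / 2.
def pvGo : List Int → Int × Int × Bool
  | [] => (0, 0, false)
  | [i] => (if i ≥ 18 then (1, 0, i == 15) else (0, 1, i == 15))
  | x :: y :: rest =>
      let l := x :: y :: rest
      let mid := l.length / 2
      let r1 := pvGo (l.take mid)
      let r2 := pvGo (l.drop mid)
      (r1.1 + r2.1, r1.2.1 + r2.2.1, r1.2.2 || r2.2.2)
termination_by l => l.length
decreasing_by
  · simp only [List.length_take, List.length_cons]; omega
  · simp only [List.length_drop, List.length_cons]; omega

def analisar_idades_alt (idades : List Int) : Int × Int × Bool := pvGo idades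

-- ===== PRECONDITION & SPEC =====
def Spec_analisar_idades (idades : List Int) (out : Int × Int × Bool) : Prop := out = analisar_idades_alt idades
instance (idades : List Int) (out : Int × Int × Bool) : Decidable (Spec_analisar_idades idades out) := by unfold Spec_analisar_idades; infer_instance

-- ===== CLAIM =====
def Claim_equal_analisar_idades : Prop := ∀ (idades : List Int), Dom_analisar_idades idades → Spec_analisar_idades idades (analisar_idades idades)

-- ===== LEMMAS AND PROOFS =====
-- Closed characterisation shared by both ports.
def pvSpecTriple (l : List Int) : Int × Int × Bool :=
  ((l.countP (fun i => i ≥ 18) : Nat),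
   (l.length : Int) - (l.countP (fun i => i ≥ 18) : Nat),
   l.contains 15)

theorem pvGo_eq_spec (l : List Int) : pvGo l = pvSpecTriple l := by
  induction l using pvGo.induct with
  | case1 => simp [pvGo, pvSpecTriple]
  | case2 i h =>
    by_cases hi : i = 15
    · simp [pvGo, pvSpecTriple, h, hi]
    · simp [pvGo, pvSpecTriple, hi, h, Ne.symm hi]
  | case3 i h =>
    by_cases hi : i = 15
    · simp [pvGo, pvSpecTriple, h, hi]
    · simp [pvGo, pvSpecTriple, hi, h, Ne.symm hi]
  | case4 x y rest l mid ih1 ih2 =>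
    simp only [l, mid] at ih1 ih2
    rw [pvGo]
    simp only [ih1, ih2, pvSpecTriple]
    have hsplit : (x :: y :: rest).take ((x :: y :: rest).length / 2) ++
        (x :: y :: rest).drop ((x :: y :: rest).length / 2) = x :: y :: rest :=
      List.take_append_drop _ _
    simp only [Prod.mk.injEq]
    refine ⟨?_, ?_, ?_⟩
    · conv_rhs => rw [← hsplit]
      rw [List.countP_append]; push_cast; ring
    · conv_rhs => rw [← hsplit]
      rw [List.countP_append, List.length_append]; push_cast; ring
    · conv_rhs => rw [← hsplit]
      rw [List.contains_append]

theorem analisar_idades_foldl (idades : List Int) (a m : Int) (q : Bool) :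
    idades.foldl
      (fun st idade =>
        let st1 : Int × Int × Bool :=
          if idade ≥ 18 then (st.1 + 1, st.2.1, st.2.2) else (st.1, st.2.1 + 1, st.2.2)
        if idade = 15 then (st1.1, st1.2.1, true) else st1)
      (a, m, q)
    = (a + (idades.countP (fun i => i ≥ 18) : Nat),
       m + ((idades.length : Int) - (idades.countP (fun i => i ≥ 18) : Nat)),
       q || idades.contains 15) := by
  induction idades generalizing a m q with
  | nil => simp
  | cons x xs ih =>
    simp only [List.foldl_cons]
    by_cases h15 : x = 15
    · subst h15
      norm_num
      rw [ih]
      simp only [Prod.mk.injEq]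
      norm_num
      omega
    · by_cases h18 : x ≥ 18 <;>
        simp only [h15, h18, ge_iff_le, if_pos, if_neg, not_false_eq_true] <;>
        rw [ih] <;>
        simp only [List.countP_cons, List.length_cons, List.contains_cons, h18,
          ge_iff_le, decide_true, decide_false, Prod.mk.injEq] <;>
        refine ⟨by push_cast; omega, by push_cast; omega, ?_⟩ <;>
        rw [show ((15 : Int) == x) = false by rw [beq_eq_false_iff_ne]; exact fun h => h15 h.symm, Bool.false_or]

-- ===== VERDICT =====
theorem analisar_idades_spec : Claim_equal_analisar_idades := by
  intro idades _
  show _ = _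
  rw [analisar_idades_alt, pvGo_eq_spec]
  simp [analisar_idades, analisar_idades_foldl, pvSpecTriple]
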